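-- pv_equiv track=rewrite | github.com/slebok/zoo | hunter.py | assembleQualifiedNumbers
-- ===== SOURCE A (Python) =====
-- from functools import reduce
--
-- def isQNumber(x):
-- 	if x =='.':
-- 		return False
-- 	else:
-- 		return reduce(lambda a,b:a and b=='.' or b.isdigit(),x,True)
--
-- def assembleQualifiedNumbers(ts):
-- 	ds = []
-- 	for x in ts:
-- 		if len(ds)>0 and (isQNumber(x) or x=='.') and isQNumber(ds[-1]):
-- 			ds[-1] += x
-- 		else:
-- 			ds.append(x)
-- 	return ds
-- ===== SOURCE B (Python) =====
-- def _qtail(x):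
--     # True iff x's last non-dot character is a digit (or x is all dots/empty);
--     # this equals A's reduce value, and also A's merge test on the incoming token.
--     t = x.rstrip('.')
--     return t == '' or t[-1].isdigit()
--
--
-- def assembleQualifiedNumbers(ts):
--     if not ts:
--         return []
--     out = []
--     cur = ts[0]
--     curQ = cur != '.' and _qtail(cur)
--     for x in ts[1:]:
--         if curQ and _qtail(x):
--             cur += x
--             curQ = cur != '.'
--         else:
--             out.append(cur)
--             cur = x
--             curQ = x != '.' and _qtail(x)
--     out.append(cur)
--     return out
-- ===== Notes on version B (the rewrite author's own statement) =====
-- stated objective: faster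
-- what changed: B keeps a pending token plus an incrementally-maintained boolean qualified-number flag, deciding merges via an O(|x|) last-non-dot-char-is-digit test on the incoming token only, instead of A's re-running the reduce over the ever-growing merged token on every step.
import Mathlib
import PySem

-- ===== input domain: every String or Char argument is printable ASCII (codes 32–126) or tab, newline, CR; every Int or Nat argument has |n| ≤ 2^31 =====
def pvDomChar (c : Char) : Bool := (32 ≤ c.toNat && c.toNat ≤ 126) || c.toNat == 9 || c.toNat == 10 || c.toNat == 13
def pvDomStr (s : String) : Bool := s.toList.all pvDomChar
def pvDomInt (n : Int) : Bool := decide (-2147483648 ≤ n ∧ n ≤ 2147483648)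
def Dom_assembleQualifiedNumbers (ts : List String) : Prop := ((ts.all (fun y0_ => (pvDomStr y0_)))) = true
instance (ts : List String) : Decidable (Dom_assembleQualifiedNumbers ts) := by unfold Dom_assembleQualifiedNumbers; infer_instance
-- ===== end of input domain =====

-- B replaces A's per-step re-scan of the merged last token by an incrementally maintained
-- flag plus a last-non-dot-char test on the incoming token (objective: faster, asymptotic).
-- ===== PORT A =====
-- reduce(lambda a,b: a and b=='.' or b.isdigit(), x, True)
def isQNumberA (x : String) : Bool :=
  if x == "." then false
  else x.toList.foldl (fun a b => (a && (b == '.')) || b.isDigit) true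

-- loop body of A (ds[-1] read via getLast?, len(ds)>0 ↔ getLast? = some _)
def aStep (ds : List String) (x : String) : List String :=
  match ds.getLast? with
  | some l =>
      if (isQNumberA x || (x == ".")) && isQNumberA l then
        ds.dropLast ++ [l ++ x]
      else ds ++ [x]
  | none => ds ++ [x]

def assembleQualifiedNumbers (ts : List String) : List String :=
  ts.foldl aStep []

-- ===== PORT B =====
-- t = x.rstrip('.'); t == '' or t[-1].isdigit()   (exact: hand port of rstrip('.') + last char)
def qtail (x : String) : Bool :=
  match x.toList.reverse.dropWhile (fun c => c == '.') with
  | [] => true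
  | c :: _ => c.isDigit

-- loop body of B: state = (flushed output, pending token, its qualified-number flag)
def bStep (st : List String × String × Bool) (x : String) : List String × String × Bool :=
  match st with
  | (out, cur, curQ) =>
    if curQ && qtail x then (out, cur ++ x, decide (cur ++ x ≠ "."))
    else (out ++ [cur], x, decide (x ≠ ".") && qtail x)

def assembleQualifiedNumbers_alt (ts : List String) : List String :=
  match ts with
  | [] => []
  | h :: t =>
    let s := t.foldl bStep ([], h, decide (h ≠ ".") && qtail h)
    s.1 ++ [s.2.1]

-- ===== PRECONDITION & SPEC =====
def Spec_assembleQualifiedNumbers (ts : List String) (out : List String) : Prop := out = assembleQualifiedNumbers_alt ts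
instance (ts : List String) (out : List String) : Decidable (Spec_assembleQualifiedNumbers ts out) := by unfold Spec_assembleQualifiedNumbers; infer_instance

-- ===== CLAIM (what is proved, stated in full; the proofs are below) =====
def Claim_equal_assembleQualifiedNumbers : Prop := ∀ (ts : List String), Dom_assembleQualifiedNumbers ts → Spec_assembleQualifiedNumbers ts (assembleQualifiedNumbers ts)

-- ===== LEMMAS AND PROOFS =====

theorem fold_eq_aux (l : List Char) :
    l.foldl (fun a b => (a && (b == '.')) || b.isDigit) true =
    (match l.reverse.dropWhile (fun c => c == '.') with
     | [] => true
     | c :: _ => c.isDigit) := by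
  induction l using List.reverseRecOn with
  | nil => simp
  | append_singleton l c ih =>
    by_cases hc : c = '.'
    · subst hc
      simp [List.foldl_append, ih]
    · simp [List.foldl_append, hc]

theorem qtail_eq_fold (x : String) :
    qtail x = x.toList.foldl (fun a b => (a && (b == '.')) || b.isDigit) true := by
  rw [qtail, fold_eq_aux]

theorem isQNumberA_eq (x : String) :
    isQNumberA x = (decide (x ≠ ".") && qtail x) := by
  by_cases h : x = "."
  · subst h; simp [isQNumberA]
  · simp [isQNumberA, h, qtail_eq_fold]

theorem cond_eq (x : String) :
    (isQNumberA x || (x == ".")) = qtail x := by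
  by_cases h : x = "."
  · subst h; simp [isQNumberA]; decide
  · simp [isQNumberA_eq, h, qtail_eq_fold]

theorem qtail_append (cur x : String) (hc : qtail cur = true) (hx : qtail x = true) :
    qtail (cur ++ x) = true := by
  rw [qtail_eq_fold] at hc hx ⊢
  rw [String.toList_append, List.foldl_append, hc, hx]

theorem main_aux (t : List String) (out : List String) (cur : String) :
    t.foldl aStep (out ++ [cur]) =
      ((t.foldl bStep (out, cur, decide (cur ≠ ".") && qtail cur)).1 ++
        [(t.foldl bStep (out, cur, decide (cur ≠ ".") && qtail cur)).2.1]) := by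
  induction t generalizing out cur with
  | nil => simp
  | cons x t ih =>
    simp only [List.foldl_cons]
    rw [show aStep (out ++ [cur]) x =
        (if (decide (cur ≠ ".") && qtail cur) && qtail x then out ++ [cur ++ x]
         else (out ++ [cur]) ++ [x]) from ?_]
    · rw [show bStep (out, cur, decide (cur ≠ ".") && qtail cur) x =
          (if (decide (cur ≠ ".") && qtail cur) && qtail x then
             (out, cur ++ x, decide (cur ++ x ≠ "."))
           else (out ++ [cur], x, decide (x ≠ ".") && qtail x)) from rfl]
      by_cases hcnd : ((decide (cur ≠ ".") && qtail cur) && qtail x) = true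
      · rw [if_pos hcnd, if_pos hcnd]
        have hq : qtail (cur ++ x) = true := by
          simp only [Bool.and_eq_true, decide_eq_true_eq] at hcnd
          exact qtail_append cur x hcnd.1.2 hcnd.2
        rw [show decide (cur ++ x ≠ ".") = (decide (cur ++ x ≠ ".") && qtail (cur ++ x)) by
              rw [hq, Bool.and_true]]
        exact ih out (cur ++ x)
      · rw [if_neg hcnd, if_neg hcnd]
        exact ih (out ++ [cur]) x
    · rw [aStep]
      rw [List.getLast?_concat]
      simp only [List.dropLast_concat]
      rw [cond_eq, isQNumberA_eq, Bool.and_comm]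

-- ===== VERDICT (by name: the statement is the Claim_ definition above) =====
theorem assembleQualifiedNumbers_spec : Claim_equal_assembleQualifiedNumbers := by
  intro ts _
  unfold Spec_assembleQualifiedNumbers assembleQualifiedNumbers assembleQualifiedNumbers_alt
  cases ts with
  | nil => rfl
  | cons h t =>
    simp only [List.foldl_cons]
    rw [show aStep [] h = [] ++ [h] from rfl]
    exact main_aux t [] h
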